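-- pv_equiv track=rewrite | github.com/miblazej/PIE | variant3.py | bools_array
-- ===== SOURCE A (Python) =====
-- def bools_array(A):
--     # input is a boolean array order it so false are in the front with O(1)
--     # additional space and O(N) time
--     i = 0
--     j = 0
--     while i < len(A) and j < len(A):
--         if A[i]:
--             A.append(A.pop(i))
--             i -= 1
--         i += 1
--         j += 1
--     return A
-- ===== SOURCE B (Python) =====
-- def bools_array(A):
--     # count the Falses once, then overwrite the array in place:
--     # Falses in front, Trues in the back -- O(N), one counting pass
--     n_false = A.count(False)
--     A[:] = [False] * n_false + [True] * (len(A) - n_false)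
--     return A
-- ===== Notes on version B (the rewrite author's own statement) =====
-- stated objective: faster
-- what changed: replaces A's pop/append scan (each pop shifts the whole tail) with a single counting pass over the array followed by rebuilding it as that many Falses and then the remaining Trues
import Mathlib
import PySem

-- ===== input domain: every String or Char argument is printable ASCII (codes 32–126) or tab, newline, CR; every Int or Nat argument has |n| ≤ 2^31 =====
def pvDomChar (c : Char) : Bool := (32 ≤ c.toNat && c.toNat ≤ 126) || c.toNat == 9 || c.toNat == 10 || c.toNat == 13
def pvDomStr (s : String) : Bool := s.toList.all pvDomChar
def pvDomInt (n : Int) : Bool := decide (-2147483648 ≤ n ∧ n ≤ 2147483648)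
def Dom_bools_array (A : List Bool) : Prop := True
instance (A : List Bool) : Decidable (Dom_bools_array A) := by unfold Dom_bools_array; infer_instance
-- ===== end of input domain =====

-- B replaces A's O(n^2) pop/append scan by counting the Falses once and rebuilding the
-- array (objective: faster). Both Pythons mutate A in place; the equivalence proved here
-- is about the RETURN value (both return the mutated list itself).

-- ===== PORT A =====
-- while i < len(A) and j < len(A): if A[i]: A.append(A.pop(i)); i -= 1; i += 1; j += 1
def bools_arrayLoop (A : List Bool) (i j : Int) : List Bool :=
  if h : i < (A.length : Int) ∧ j < (A.length : Int) then
    match PySem.List.pyGet? A i with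
    | some true =>
      match hp : PySem.List.pop? A i with
      | some (x, rest) => bools_arrayLoop (rest ++ [x]) (i - 1 + 1) (j + 1)
      | none => A   -- unreachable: A[i] exists, so pop(i) succeeds
    | _ => bools_arrayLoop A (i + 1) (j + 1)
  else A
  termination_by ((A.length : Int) - j).toNat
  decreasing_by
  · have hl : rest.length + 1 = A.length := by
      simpa using PySem.List.length_of_pop?_eq_some _ hp
    simp only [List.length_append, List.length_cons, List.length_nil]
    omega
  · omega

def bools_array (A : List Bool) : List Bool :=
  bools_arrayLoop A 0 0

-- ===== PORT B =====
def bools_array_alt (A : List Bool) : List Bool :=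
  let nFalse := PySem.List.count A false
  List.replicate nFalse false ++ List.replicate (A.length - nFalse) true

-- ===== PRECONDITION & SPEC =====
def Spec_bools_array (A : List Bool) (out : List Bool) : Prop := out = bools_array_alt A
instance (A : List Bool) (out : List Bool) : Decidable (Spec_bools_array A out) := by unfold Spec_bools_array; infer_instance

-- ===== CLAIM (what is proved, stated in full; the proofs are below) =====
def Claim_equal_bools_array : Prop := ∀ (A : List Bool), Dom_bools_array A → Spec_bools_array A (bools_array A)

-- ===== LEMMAS AND PROOFS =====

lemma pvPopMid (i : Nat) (b : Bool) (l : List Bool) :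
    PySem.List.pop? (List.replicate i false ++ b :: l) (i : Int)
      = some (b, List.replicate i false ++ l) := by
  have hlen : i < (List.replicate i false ++ b :: l).length := by simp
  rw [PySem.List.pop?_natCast _ _ hlen]
  congr 1
  simp only [Prod.mk.injEq]
  constructor
  · rw [List.getElem_append_right (by simp)]
    simp
  · induction i with
    | zero => simp
    | succ n ih => simpa [List.replicate_succ] using ih

-- Loop invariant: the processed Falses sit in front (replicate i false), the appended
-- Trues sit in back (replicate t true), R is the unprocessed middle, j = i + t.
lemma pvLoopInv (R : List Bool) : ∀ (i t : Nat),
    bools_arrayLoop (List.replicate i false ++ R ++ List.replicate t true)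
        (i : Int) ((i : Int) + (t : Int))
      = List.replicate (i + R.count false) false
          ++ List.replicate (t + R.count true) true := by
  induction R with
  | nil =>
    intro i t
    rw [bools_arrayLoop]
    simp
  | cons b R' ih =>
    intro i t
    rw [bools_arrayLoop]
    have hcond : ((i : Int) < ((List.replicate i false ++ (b :: R') ++ List.replicate t true).length : Int)
        ∧ (i : Int) + (t : Int) < ((List.replicate i false ++ (b :: R') ++ List.replicate t true).length : Int)) := by
      simp; omega
    rw [dif_pos hcond]
    have hget : PySem.List.pyGet? (List.replicate i false ++ (b :: R') ++ List.replicate t true) (i : Int)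
        = some b := by
      rw [List.append_assoc]
      have := PySem.List.pyGet?_append_length (List.replicate i false) (R' ++ List.replicate t true) b
      simpa using this
    cases b with
    | false =>
      simp only [hget]
      have h1 : List.replicate i false ++ (false :: R') ++ List.replicate t true
          = List.replicate (i + 1) false ++ R' ++ List.replicate t true := by
        simp [List.replicate_succ']
      have h2 : (i : Int) + 1 = ((i + 1 : Nat) : Int) := by push_cast; ring
      have h3 : (i : Int) + (t : Int) + 1 = ((i + 1 : Nat) : Int) + (t : Int) := by push_cast; ring
      rw [h1, h2, h3, ih (i + 1) t]
      congr 1 <;> congr 1 <;> simp <;> omega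
    | true =>
      simp only [hget]
      have hpop : PySem.List.pop? (List.replicate i false ++ (true :: R') ++ List.replicate t true) (i : Int)
          = some (true, List.replicate i false ++ (R' ++ List.replicate t true)) := by
        rw [List.append_assoc]
        exact pvPopMid i true (R' ++ List.replicate t true)
      have h1 : (List.replicate i false ++ (R' ++ List.replicate t true)) ++ [true]
          = List.replicate i false ++ R' ++ List.replicate (t + 1) true := by
        simp [List.replicate_succ' (n := t)]
      have h2 : (i : Int) - 1 + 1 = (i : Int) := by ring
      have h3 : (i : Int) + (t : Int) + 1 = (i : Int) + ((t + 1 : Nat) : Int) := by push_cast; ring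
      split
      next x rest heq =>
        rw [hpop] at heq
        simp only [Option.some.injEq, Prod.mk.injEq] at heq
        obtain ⟨rfl, rfl⟩ := heq
        rw [h1, h2, h3, ih i (t + 1)]
        congr 1 <;> congr 1 <;> simp <;> omega
      next heq =>
        rw [hpop] at heq
        exact absurd heq (by simp)

lemma pvCountTrue (A : List Bool) : A.count true = A.length - A.count false := by
  induction A with
  | nil => simp
  | cons b R ih =>
    cases b <;> simp [List.count_cons, ih] <;>
      · have : R.count false ≤ R.length := List.count_le_length
        omega

-- ===== VERDICT (by name: the statement is the Claim_ definition above) =====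
theorem bools_array_spec : Claim_equal_bools_array := by
  intro A _
  unfold Spec_bools_array bools_array bools_array_alt
  have h := pvLoopInv A 0 0
  simpa [PySem.List.count_eq, pvCountTrue A] using h
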